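-- pv_equiv track=rewrite | github.com/SahilSarupria/SkillRadar | backend/recommendations/utils.py | _determine_path_difficulty
-- ===== SOURCE A (Python) =====
-- from typing import Dict, List, Any, Optional
--
-- def _determine_path_difficulty(skill_group: List[Dict]) -> str:
--     """Determine the overall difficulty of the learning path"""
--     required_levels = [gap.get('required_level', 'intermediate') for gap in skill_group]
--
--     if any(level == 'expert' for level in required_levels):
--         return 'advanced'
--     elif any(level == 'advanced' for level in required_levels):
--         return 'intermediate'
--     else:
--         return 'beginner'
-- ===== SOURCE B (Python) =====
-- def _determine_path_difficulty(skill_group):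
--     """Determine the overall difficulty of the learning path"""
--     rank = {'expert': 2, 'advanced': 1}
--     top = max((rank.get(gap.get('required_level', 'intermediate'), 0) for gap in skill_group), default=0)
--     return ('beginner', 'intermediate', 'advanced')[top]
-- ===== Notes on version B (the rewrite author's own statement) =====
-- stated objective: simpler
-- what changed: Replaces the two sequential any() scans over the level list with a single max reduction over a rank table plus a rank-to-label lookup.
import Mathlib
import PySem

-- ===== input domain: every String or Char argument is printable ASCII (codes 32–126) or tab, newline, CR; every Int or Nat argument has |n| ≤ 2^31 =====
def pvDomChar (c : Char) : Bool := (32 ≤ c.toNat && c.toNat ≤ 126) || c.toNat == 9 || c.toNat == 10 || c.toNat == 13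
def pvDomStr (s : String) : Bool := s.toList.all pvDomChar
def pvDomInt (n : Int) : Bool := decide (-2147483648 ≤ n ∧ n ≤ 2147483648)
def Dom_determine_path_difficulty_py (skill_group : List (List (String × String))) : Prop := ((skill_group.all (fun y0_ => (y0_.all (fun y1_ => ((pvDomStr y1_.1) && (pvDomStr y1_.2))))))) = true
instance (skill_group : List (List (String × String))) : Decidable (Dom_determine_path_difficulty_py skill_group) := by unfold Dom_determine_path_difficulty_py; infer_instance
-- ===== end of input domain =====

-- B replaces A's two sequential any() scans by one max reduction over a rank table plus a rank→label lookup (objective: simpler).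

-- ===== PORT A =====
def determine_path_difficulty_py (skill_group : List (List (String × String))) : String :=
  let required_levels := skill_group.map (fun gap => PySem.Dict.getD (PySem.Dict.mk gap) "required_level" "intermediate")
  if required_levels.any (fun level => level == "expert") then "advanced"
  else if required_levels.any (fun level => level == "advanced") then "intermediate"
  else "beginner"

-- ===== PORT B =====
-- rank.get(level, 0) for the dict {'expert': 2, 'advanced': 1}
def pvRank (level : String) : Nat :=
  PySem.Dict.getD ((PySem.Dict.empty).insert "expert" 2 |>.insert "advanced" 1) level 0

def determine_path_difficulty_py_alt (skill_group : List (List (String × String))) : String :=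
  let top := skill_group.foldl
    (fun acc gap => Nat.max acc (pvRank (PySem.Dict.getD (PySem.Dict.mk gap) "required_level" "intermediate"))) 0
  (["beginner", "intermediate", "advanced"].getD top "beginner")

-- ===== PRECONDITION & SPEC =====
def Spec_determine_path_difficulty_py (skill_group : List (List (String × String))) (out : String) : Prop := out = determine_path_difficulty_py_alt skill_group
instance (skill_group : List (List (String × String))) (out : String) : Decidable (Spec_determine_path_difficulty_py skill_group out) := by unfold Spec_determine_path_difficulty_py; infer_instance

-- ===== CLAIM (what is proved, stated in full; the proofs are below) =====
def Claim_equal_determine_path_difficulty_py : Prop := ∀ (skill_group : List (List (String × String))), Dom_determine_path_difficulty_py skill_group → Spec_determine_path_difficulty_py skill_group (determine_path_difficulty_py skill_group)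

-- ===== LEMMAS AND PROOFS =====

-- the max reduction over a list of levels
def pvMaxRank (ls : List String) : Nat := ls.foldl (fun acc s => Nat.max acc (pvRank s)) 0

lemma pvMaxRank_shift (ls : List String) (a : Nat) :
    ls.foldl (fun acc s => Nat.max acc (pvRank s)) a = Nat.max a (pvMaxRank ls) := by
  induction ls generalizing a with
  | nil => simp [pvMaxRank]
  | cons x t ih =>
      rw [List.foldl_cons, ih]
      conv_rhs => rw [pvMaxRank, List.foldl_cons, ih]
      simp [Nat.max_assoc]

lemma pvMaxRank_cons (x : String) (t : List String) :
    pvMaxRank (x :: t) = Nat.max (pvRank x) (pvMaxRank t) := by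
  rw [pvMaxRank, List.foldl_cons, pvMaxRank_shift]
  simp

lemma pvRank_eq (s : String) :
    pvRank s = (if s == "expert" then 2 else if s == "advanced" then 1 else 0) := by
  by_cases h1 : s = "expert"
  · simp [pvRank, h1, PySem.Dict.getD, PySem.Dict.get?, PySem.Dict.insert, PySem.Dict.empty]
  · have e1 : ("expert" == s) = false := beq_eq_false_iff_ne.mpr (Ne.symm h1)
    by_cases h2 : s = "advanced"
    · simp [pvRank, h2, PySem.Dict.getD, PySem.Dict.get?, PySem.Dict.insert, PySem.Dict.empty, List.find?]
    · have e2 : ("advanced" == s) = false := beq_eq_false_iff_ne.mpr (Ne.symm h2)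
      simp [pvRank, h1, h2, e1, e2, PySem.Dict.getD, PySem.Dict.get?, PySem.Dict.insert, PySem.Dict.empty, List.find?]

-- closed form of the max reduction in terms of A's two any-scans
lemma pvMaxRank_char (ls : List String) :
    pvMaxRank ls =
      (if ls.any (fun level => level == "expert") then 2
       else if ls.any (fun level => level == "advanced") then 1 else 0) := by
  induction ls with
  | nil => simp [pvMaxRank]
  | cons x t ih =>
      rw [pvMaxRank_cons, ih, pvRank_eq]
      by_cases h1 : x = "expert" <;> by_cases h2 : x = "advanced" <;>
        by_cases ht1 : t.any (fun level => level == "expert") <;>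
          by_cases ht2 : t.any (fun level => level == "advanced") <;>
            simp [h1, h2, ht1, ht2, List.any_cons]

-- ===== VERDICT (by name: the statement is the Claim_ definition above) =====
theorem determine_path_difficulty_py_spec : Claim_equal_determine_path_difficulty_py := by
  intro g _
  unfold Spec_determine_path_difficulty_py determine_path_difficulty_py determine_path_difficulty_py_alt
  rw [show (g.foldl (fun acc gap => Nat.max acc (pvRank (PySem.Dict.getD (PySem.Dict.mk gap) "required_level" "intermediate"))) 0)
        = pvMaxRank (g.map (fun gap => PySem.Dict.getD (PySem.Dict.mk gap) "required_level" "intermediate")) by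
      simp [pvMaxRank, List.foldl_map]]
  rw [pvMaxRank_char]
  split_ifs <;> simp_all <;> split_ifs <;> simp_all
  all_goals rename_i hE hA hex
  all_goals obtain ⟨x, hx, he⟩ := hex
  · exact hE x hx he
  · exact hA x hx he
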